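-- pv_equiv track=rewrite | github.com/AnthonyWarwick/MA3K7 | Untitled3.py | find_repetition_period
-- ===== SOURCE A (Python) =====
-- def find_repetition_period(first_num1, first_num2):
--     sequence = [first_num1, first_num2]
--     seen_patterns = {(first_num1, first_num2): 0}
--
--     for i in range(1, 100):  # Limit to prevent infinite loops
--         next_num = (sequence[-1] + sequence[-2]) % 10
--         sequence.append(next_num)
--
--         current_pattern = (sequence[-2], sequence[-1])
--
--         if current_pattern in seen_patterns:
--             return i
--
--         seen_patterns[current_pattern] = i
--
--     return None  # No repetition found within a reasonable limit
-- ===== SOURCE B (Python) =====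
-- def find_repetition_period(first_num1, first_num2):
--     # The step map (a, b) -> (b, (a+b) % 10) is injective on digit pairs, so the
--     # orbit is rho-shaped with a tail of length at most 2: the first repeated
--     # state must equal one of the first three states.  O(1) memory, no seen-dict.
--     def step(s):
--         a, b = s
--         return (b, (a + b) % 10)
--
--     s0 = (first_num1, first_num2)
--     s1 = step(s0)
--     s2 = step(s1)
--     if s1 == s0:
--         return 1
--     if s2 == s0 or s2 == s1:
--         return 2
--     cur = s2
--     for i in range(3, 100):
--         cur = step(cur)
--         if cur == s0 or cur == s1 or cur == s2:
--             return i
--     return None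
-- ===== Notes on version B (the rewrite author's own statement) =====
-- stated objective: alternative
-- what changed: B drops A's seen-patterns dict and growing sequence list: since the step map (a,b)->(b,(a+b)%10) is injective on digit pairs, the orbit is rho-shaped with tail length at most 2, so B just iterates the state pair and compares it against the first three states, in O(1) memory.
import Mathlib
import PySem

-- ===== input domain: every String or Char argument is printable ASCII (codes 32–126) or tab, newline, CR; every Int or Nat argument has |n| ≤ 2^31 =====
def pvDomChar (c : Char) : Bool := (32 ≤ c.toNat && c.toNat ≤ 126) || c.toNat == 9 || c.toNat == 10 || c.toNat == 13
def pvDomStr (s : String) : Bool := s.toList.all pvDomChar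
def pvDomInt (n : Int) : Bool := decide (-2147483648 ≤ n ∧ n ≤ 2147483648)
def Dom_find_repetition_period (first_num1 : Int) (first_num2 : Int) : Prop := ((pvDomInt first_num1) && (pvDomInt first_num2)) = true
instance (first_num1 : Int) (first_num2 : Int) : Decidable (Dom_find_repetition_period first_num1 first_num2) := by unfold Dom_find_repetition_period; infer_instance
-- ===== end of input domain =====

-- B replaces A's seen-patterns dict by an O(1)-memory scan: the step map is injective
-- on digit pairs, so the first repeated state can only equal one of the first three states.

-- ===== PORT A =====
-- the sequence list is kept reversed (most recent element first): same elements, same values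
def goA : Nat → Int → List Int → PySem.Dict (Int × Int) Int → Option Int
  | 0, _, _, _ => none
  | fuel+1, i, seq, seen =>
      match seq with
      | last :: prev :: _ =>
        let next := PySem.Int.mod (last + prev) 10
        let seq' := next :: seq
        let pat := (last, next)
        if (seen.get? pat).isSome then some i
        else goA fuel (i+1) seq' (seen.insert pat i)
      | _ => none

def find_repetition_period (first_num1 : Int) (first_num2 : Int) : Option Int :=
  goA 99 1 [first_num2, first_num1] (PySem.Dict.empty.insert (first_num1, first_num2) 0)

-- ===== PORT B =====
def stepB (s : Int × Int) : Int × Int := (s.2, PySem.Int.mod (s.1 + s.2) 10)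

def goB : Nat → Int → (Int × Int) → (Int × Int) → (Int × Int) → (Int × Int) → Option Int
  | 0, _, _, _, _, _ => none
  | fuel+1, i, cur, s0, s1, s2 =>
      let c := stepB cur
      if c = s0 ∨ c = s1 ∨ c = s2 then some i
      else goB fuel (i+1) c s0 s1 s2

def find_repetition_period_alt (first_num1 : Int) (first_num2 : Int) : Option Int :=
  let s0 := (first_num1, first_num2)
  let s1 := stepB s0
  let s2 := stepB s1
  if s1 = s0 then some 1
  else if s2 = s0 ∨ s2 = s1 then some 2
  else goB 97 3 s2 s0 s1 s2

-- ===== PRECONDITION & SPEC =====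
def Spec_find_repetition_period (first_num1 : Int) (first_num2 : Int) (out : Option Int) : Prop := out = find_repetition_period_alt first_num1 first_num2
instance (first_num1 : Int) (first_num2 : Int) (out : Option Int) : Decidable (Spec_find_repetition_period first_num1 first_num2 out) := by unfold Spec_find_repetition_period; infer_instance

-- ===== CLAIM (what is proved, stated in full; the proofs are below) =====
def Claim_equal_find_repetition_period : Prop := ∀ (first_num1 : Int) (first_num2 : Int), Dom_find_repetition_period first_num1 first_num2 → Spec_find_repetition_period first_num1 first_num2 (find_repetition_period first_num1 first_num2)

-- ===== LEMMAS AND PROOFS =====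

-- the state sequence both programs walk: sSeq a b j = (x_j, x_{j+1}) of the mod-10 Fibonacci orbit
def sSeq (a b : Int) : Nat → Int × Int
  | 0 => (a, b)
  | n+1 => stepB (sSeq a b n)

theorem pymod_eq (x : Int) : PySem.Int.mod x 10 = x % 10 :=
  PySem.Int.mod_eq_emod_of_pos (by norm_num)

theorem sSeq_snd_bounds (a b : Int) (n : Nat) :
    0 ≤ (sSeq a b (n+1)).2 ∧ (sSeq a b (n+1)).2 < 10 := by
  have h : sSeq a b (n+1) = stepB (sSeq a b n) := rfl
  rw [h]
  simp [stepB]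
  omega

theorem sSeq_fst_bounds (a b : Int) (n : Nat) :
    0 ≤ (sSeq a b (n+2)).1 ∧ (sSeq a b (n+2)).1 < 10 := by
  have h := sSeq_snd_bounds a b n
  exact h

theorem stepB_inj (p q : Int × Int) (hp : 0 ≤ p.1 ∧ p.1 < 10) (hq : 0 ≤ q.1 ∧ q.1 < 10)
    (h : stepB p = stepB q) : p = q := by
  obtain ⟨p1, p2⟩ := p
  obtain ⟨q1, q2⟩ := q
  simp only [stepB, pymod_eq, Prod.mk.injEq] at h ⊢
  obtain ⟨h2, h1⟩ := h
  subst h2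
  constructor
  · omega
  · rfl

-- at the FIRST repeat, the matched earlier index is at most 2 (injectivity of stepB on digit pairs)
theorem no_big_repeat (a b : Int) (i j : Nat) (h3 : 3 ≤ j) (hji : j < i)
    (hmin : ∀ i' j', j' < i' → i' < i → sSeq a b i' ≠ sSeq a b j')
    (heq : sSeq a b i = sSeq a b j) : False := by
  obtain ⟨i', rfl⟩ : ∃ i', i = i' + 1 := ⟨i - 1, by omega⟩
  obtain ⟨j', rfl⟩ : ∃ j', j = j' + 1 := ⟨j - 1, by omega⟩
  have hi2 : ∃ i'', i' = i'' + 2 := ⟨i' - 2, by omega⟩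
  have hj2 : ∃ j'', j' = j'' + 2 := ⟨j' - 2, by omega⟩
  obtain ⟨i'', rfl⟩ := hi2
  obtain ⟨j'', rfl⟩ := hj2
  have := stepB_inj (sSeq a b (i''+2)) (sSeq a b (j''+2))
    (sSeq_fst_bounds a b i'') (sSeq_fst_bounds a b j'') heq
  exact hmin (i''+2) (j''+2) (by omega) (by omega) this

theorem goA_succ (f : Nat) (i last prev : Int) (r : List Int) (D : PySem.Dict (Int × Int) Int) :
    goA (f+1) i (last :: prev :: r) D =
      if ((D.get? (last, PySem.Int.mod (last + prev) 10)).isSome) then some i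
      else goA f (i+1) (PySem.Int.mod (last + prev) 10 :: last :: prev :: r)
             (D.insert (last, PySem.Int.mod (last + prev) 10) i) := rfl

theorem goB_succ (f : Nat) (i : Int) (cur s0 s1 s2 : Int × Int) :
    goB (f+1) i cur s0 s1 s2 =
      if stepB cur = s0 ∨ stepB cur = s1 ∨ stepB cur = s2 then some i
      else goB f (i+1) (stepB cur) s0 s1 s2 := rfl

-- pattern computed by goA at step i is exactly the state sSeq a b i
theorem pat_eq (a b : Int) (i : Nat) :
    ((sSeq a b i).2, PySem.Int.mod ((sSeq a b i).2 + (sSeq a b i).1) 10) = sSeq a b (i+1) := by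
  show _ = stepB (sSeq a b i)
  simp only [stepB, Int.add_comm]

-- the coupled loop invariant: from step 3 on, A's dict-driven loop and B's three-state loop agree
theorem loop_eq (a b : Int) : ∀ (f i : Nat) (r : List Int) (D : PySem.Dict (Int × Int) Int),
    3 ≤ i →
    (∀ p : Int × Int, ((D.get? p).isSome = true ↔ ∃ j, j < i ∧ p = sSeq a b j)) →
    (∀ i' j', j' < i' → i' < i → sSeq a b i' ≠ sSeq a b j') →
    goA f (i : Int) ((sSeq a b (i-1)).2 :: (sSeq a b (i-1)).1 :: r) D
      = goB f (i : Int) (sSeq a b (i-1)) (sSeq a b 0) (sSeq a b 1) (sSeq a b 2) := by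
  intro f
  induction f with
  | zero => intro i r D _ _ _; rfl
  | succ f ih =>
    intro i r D hi hD hmin
    rw [goA_succ, goB_succ]
    have hstep : stepB (sSeq a b (i-1)) = sSeq a b i := by
      have : i - 1 + 1 = i := by omega
      rw [← this]; rfl
    have hpat : ((sSeq a b (i-1)).2, PySem.Int.mod ((sSeq a b (i-1)).2 + (sSeq a b (i-1)).1) 10)
        = sSeq a b i := by
      rw [pat_eq]; congr 1; omega
    have hgets : (D.get? (sSeq a b i)).isSome = true ↔
        (sSeq a b i = sSeq a b 0 ∨ sSeq a b i = sSeq a b 1 ∨ sSeq a b i = sSeq a b 2) := by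
      rw [hD]
      constructor
      · rintro ⟨j, hj, hpe⟩
        by_cases hj3 : 3 ≤ j
        · exact absurd hpe (fun hpe => no_big_repeat a b i j hj3 hj hmin hpe)
        · interval_cases j
          · exact Or.inl hpe
          · exact Or.inr (Or.inl hpe)
          · exact Or.inr (Or.inr hpe)
      · rintro (h | h | h)
        · exact ⟨0, by omega, h⟩
        · exact ⟨1, by omega, h⟩
        · exact ⟨2, by omega, h⟩
    rw [hpat, hstep]
    by_cases hc : sSeq a b i = sSeq a b 0 ∨ sSeq a b i = sSeq a b 1 ∨ sSeq a b i = sSeq a b 2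
    · rw [if_pos (hgets.mpr hc), if_pos hc]
    · rw [if_neg (fun h => hc (hgets.mp h)), if_neg hc]
      have hnorep : ∀ j, j < i → sSeq a b i ≠ sSeq a b j := by
        intro j hj hpe
        by_cases hj3 : 3 ≤ j
        · exact no_big_repeat a b i j hj3 hj hmin hpe
        · apply hc
          interval_cases j
          · exact Or.inl hpe
          · exact Or.inr (Or.inl hpe)
          · exact Or.inr (Or.inr hpe)
      have hseq2 : (sSeq a b i).2 :: (sSeq a b i).1 :: ((sSeq a b (i-1)).1 :: r)
          = (sSeq a b (i+1-1)).2 :: (sSeq a b (i+1-1)).1 :: ((sSeq a b (i-1)).1 :: r) := by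
        have : i + 1 - 1 = i := by omega
        rw [this]
      have hgoal := ih (i+1) ((sSeq a b (i-1)).1 :: r) (D.insert (sSeq a b i) (i : Int))
        (by omega)
        (by
          intro p
          rw [PySem.Dict.get?_insert]
          by_cases hp : p = sSeq a b i
          · simp only [hp, if_true]
            exact ⟨fun _ => ⟨i, by omega, rfl⟩, fun _ => rfl⟩
          · rw [if_neg hp, hD]
            constructor
            · rintro ⟨j, hj, hpe⟩; exact ⟨j, by omega, hpe⟩
            · rintro ⟨j, hj, hpe⟩
              rcases Nat.lt_or_ge j i with h' | h'
              · exact ⟨j, h', hpe⟩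
              · have : j = i := by omega
                exact absurd (hpe.trans (congrArg _ this)) hp)
        (by
          intro i' j' hji' hi'
          rcases Nat.lt_or_ge i' i with h' | h'
          · exact hmin i' j' hji' h'
          · have : i' = i := by omega
            subst this
            exact hnorep j' hji')
      have hcast : ((i : Int) + 1) = ((i + 1 : Nat) : Int) := by push_cast; ring
      have hnext : PySem.Int.mod ((sSeq a b (i-1)).2 + (sSeq a b (i-1)).1) 10 = (sSeq a b i).2 :=
        congrArg Prod.snd hpat
      rw [hcast, hnext]
      -- align the sequence head with sSeq at index (i+1)-1 = i
      have hfst : (sSeq a b i).1 = (sSeq a b (i-1)).2 := by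
        rw [← hstep]; rfl
      calc goA f ((i+1 : Nat) : Int)
            ((sSeq a b i).2 :: (sSeq a b (i-1)).2 :: (sSeq a b (i-1)).1 :: r)
            (D.insert (sSeq a b i) (i : Int))
          = goA f ((i+1 : Nat) : Int)
            ((sSeq a b (i+1-1)).2 :: (sSeq a b (i+1-1)).1 :: ((sSeq a b (i-1)).1 :: r))
            (D.insert (sSeq a b i) (i : Int)) := by
              rw [← hfst, hseq2]
        _ = goB f ((i+1 : Nat) : Int) (sSeq a b (i+1-1)) (sSeq a b 0) (sSeq a b 1) (sSeq a b 2) :=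
              hgoal
        _ = goB f ((i+1 : Nat) : Int) (sSeq a b i) (sSeq a b 0) (sSeq a b 1) (sSeq a b 2) := by
              have : i + 1 - 1 = i := by omega
              rw [this]

-- ===== VERDICT (by name: the statement is the Claim_ definition above) =====
theorem find_repetition_period_spec : Claim_equal_find_repetition_period := by
  intro a b _
  unfold Spec_find_repetition_period find_repetition_period find_repetition_period_alt
  have hs1 : sSeq a b 1 = (b, PySem.Int.mod (b + a) 10) := by
    show stepB (a, b) = _
    simp only [stepB, Int.add_comm]
  dsimp only
  rw [show (99 : Nat) = 98 + 1 from rfl, goA_succ]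
  rw [show PySem.Int.mod (b + a) 10 = (sSeq a b 1).2 from (congrArg Prod.snd hs1).symm]
  rw [show ((b : Int), (sSeq a b 1).2) = sSeq a b 1 from rfl]
  rw [show stepB (stepB (a, b)) = sSeq a b 2 from rfl]
  rw [show stepB ((a : Int), (b : Int)) = sSeq a b 1 from rfl]
  rw [show ((a : Int), (b : Int)) = sSeq a b 0 from rfl]
  by_cases h1 : sSeq a b 1 = sSeq a b 0
  · rw [if_pos h1, h1, PySem.Dict.get?_insert_self]
    simp
  · rw [if_neg h1, PySem.Dict.get?_insert, if_neg h1, PySem.Dict.get?_empty]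
    simp only [Option.isSome_none, Bool.false_eq_true, if_false]
    rw [show (98 : Nat) = 97 + 1 from rfl, goA_succ]
    have hp2 : ((sSeq a b 1).2, PySem.Int.mod ((sSeq a b 1).2 + b) 10) = sSeq a b 2 := by
      show ((sSeq a b 1).2, PySem.Int.mod ((sSeq a b 1).2 + b) 10)
          = ((sSeq a b 1).2, PySem.Int.mod ((sSeq a b 1).1 + (sSeq a b 1).2) 10)
      rw [Int.add_comm]
      rfl
    rw [show PySem.Int.mod ((sSeq a b 1).2 + b) 10 = (sSeq a b 2).2 from congrArg Prod.snd hp2]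
    rw [show ((sSeq a b 1).2, (sSeq a b 2).2) = sSeq a b 2 from rfl]
    have hc : (((PySem.Dict.empty.insert (sSeq a b 0) (0 : Int)).insert (sSeq a b 1) 1).get?
        (sSeq a b 2)).isSome = true ↔ (sSeq a b 2 = sSeq a b 0 ∨ sSeq a b 2 = sSeq a b 1) := by
      rw [PySem.Dict.get?_insert, PySem.Dict.get?_insert, PySem.Dict.get?_empty]
      constructor
      · intro h
        split_ifs at h with ha hb
        · exact Or.inr ha
        · exact Or.inl hb
        · simp at h
      · intro h
        split_ifs with ha hb
        · rfl
        · rfl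
        · rcases h with h | h
          · exact (hb h).elim
          · exact (ha h).elim
    by_cases h2 : sSeq a b 2 = sSeq a b 0 ∨ sSeq a b 2 = sSeq a b 1
    · rw [if_pos (hc.mpr h2), if_pos h2]
      norm_num
    · rw [if_neg (fun h => h2 (hc.mp h)), if_neg h2]
      push Not at h2
      obtain ⟨h2a, h2b⟩ := h2
      have hinv : ∀ p : Int × Int,
          (((((PySem.Dict.empty.insert (sSeq a b 0) (0 : Int)).insert (sSeq a b 1) 1).insert
            (sSeq a b 2) 2).get? p).isSome = true ↔ ∃ j, j < 3 ∧ p = sSeq a b j) := by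
        intro p
        rw [PySem.Dict.get?_insert, PySem.Dict.get?_insert, PySem.Dict.get?_insert,
          PySem.Dict.get?_empty]
        constructor
        · intro h
          split_ifs at h with ha hb hcc
          · exact ⟨2, by omega, ha⟩
          · exact ⟨1, by omega, hb⟩
          · exact ⟨0, by omega, hcc⟩
          · simp at h
        · rintro ⟨j, hj, rfl⟩
          interval_cases j <;> split_ifs <;> first | rfl | tauto
      have hmin : ∀ i' j', j' < i' → i' < 3 → sSeq a b i' ≠ sSeq a b j' := by
        intro i' j' hji hi3
        interval_cases i'
        · omega
        · interval_cases j'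
          · exact h1
        · interval_cases j'
          · exact h2a
          · exact h2b
      exact loop_eq a b 97 3 [b, a]
        (((PySem.Dict.empty.insert (sSeq a b 0) 0).insert (sSeq a b 1) 1).insert (sSeq a b 2) 2)
        (by omega) hinv hmin
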